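-- pv_equiv track=rewrite | github.com/vltmn/aoc | python/y2024/code/day5.py | determine_first_failure
-- ===== SOURCE A (Python) =====
-- def determine_first_failure(rule_map:  dict[int, set[int]], update: list[int]) -> tuple[int, set[int]]|None:
--     found = set()
--     all_values = set(update)
--     invalid_idx = None
--     for idx, page in enumerate(update):
--         if page in rule_map:
--             expected_preceding = rule_map[page].intersection(all_values)
--             missing = expected_preceding.difference(found)
--             if len(missing) != 0:
--                 invalid_idx = (idx, missing)
--                 break
--         found.add(page)
--     return invalid_idx
-- ===== SOURCE B (Python) =====
-- def determine_first_failure(rule_map: dict[int, set[int]], update: list[int]) -> tuple[int, set[int]] | None: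
--     # One-shot first-occurrence position index instead of an incrementally grown 'found' set.
--     pos = {}
--     for i, page in enumerate(update):
--         if page not in pos:
--             pos[page] = i
--     for idx, page in enumerate(update):
--         if page in rule_map:
--             missing = {p for p in rule_map[page] if p in pos and pos[p] >= idx}
--             if missing:
--                 return (idx, missing)
--     return None
-- ===== Notes on version B (the rewrite author's own statement) =====
-- stated objective: alternative
-- what changed: B replaces A's incrementally maintained 'found' set and the set.intersection/difference algebra with a first-occurrence position map built once; a predecessor is 'missing' exactly when its first occurrence position is >= the current index, and B early-returns instead of carrying a break flag.
import Mathlib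
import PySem

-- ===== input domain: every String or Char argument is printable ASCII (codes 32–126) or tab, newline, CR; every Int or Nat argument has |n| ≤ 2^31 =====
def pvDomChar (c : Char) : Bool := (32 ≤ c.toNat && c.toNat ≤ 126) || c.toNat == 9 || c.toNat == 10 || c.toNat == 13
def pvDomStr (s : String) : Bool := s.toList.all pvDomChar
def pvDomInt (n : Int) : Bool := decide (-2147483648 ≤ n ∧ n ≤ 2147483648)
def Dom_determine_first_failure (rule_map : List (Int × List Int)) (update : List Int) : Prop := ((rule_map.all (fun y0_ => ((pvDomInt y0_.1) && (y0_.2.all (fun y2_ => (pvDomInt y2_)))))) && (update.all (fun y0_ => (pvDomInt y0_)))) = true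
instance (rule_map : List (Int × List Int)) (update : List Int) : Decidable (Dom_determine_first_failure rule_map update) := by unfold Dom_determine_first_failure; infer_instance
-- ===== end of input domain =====

-- B drops A's incrementally maintained 'found' set and its set.intersection/difference
-- algebra: it builds a first-occurrence position map once and decides 'missing' by
-- comparing positions to the current index, with an early return (objective: alternative).

-- ===== PORT A =====
def pv_loopA (rule_map : List (Int × List Int)) (all_values : PySem.Set Int) :
    Int → List Int → PySem.Set Int → Option (Int × List Int)
  | _, [], _ => none
  | idx, page :: rest, found =>
    match PySem.Dict.get? ⟨rule_map⟩ page with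
    | some preds =>
        let expected_preceding := PySem.Set.inter preds all_values
        let missing := PySem.Set.diff expected_preceding found
        if missing.length ≠ 0 then some (idx, missing)
        else pv_loopA rule_map all_values (idx + 1) rest (PySem.Set.add found page)
    | none => pv_loopA rule_map all_values (idx + 1) rest (PySem.Set.add found page)

def determine_first_failure (rule_map : List (Int × List Int)) (update : List Int) : Option (Int × List Int) :=
  pv_loopA rule_map (PySem.Set.ofList update) 0 update PySem.Set.empty

-- ===== PORT B =====
-- first loop of Source B: pos[page] = i for the first occurrence of page
def pv_posGo : Int → List Int → PySem.Dict Int Int → PySem.Dict Int Int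
  | _, [], pos => pos
  | i, page :: rest, pos =>
      pv_posGo (i + 1) rest (if (PySem.Dict.get? pos page).isSome then pos else PySem.Dict.insert pos page i)

-- second loop of Source B: find the first index whose required predecessors all sit later
def pv_loopB (rule_map : List (Int × List Int)) (pos : PySem.Dict Int Int) :
    Int → List Int → Option (Int × List Int)
  | _, [] => none
  | idx, page :: rest =>
    match PySem.Dict.get? ⟨rule_map⟩ page with
    | some preds =>
        let missing := PySem.Set.ofList (preds.filter (fun p =>
            match PySem.Dict.get? pos p with
            | some j => decide (idx ≤ j)
            | none => false))
        if missing ≠ [] then some (idx, missing) else pv_loopB rule_map pos (idx + 1) rest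
    | none => pv_loopB rule_map pos (idx + 1) rest

def determine_first_failure_alt (rule_map : List (Int × List Int)) (update : List Int) : Option (Int × List Int) :=
  pv_loopB rule_map (pv_posGo 0 update ⟨[]⟩) 0 update

-- ===== PRECONDITION & SPEC =====
-- Pre_ only states that each rule_map value is duplicate-free, which the Python type
-- dict[int, set[int]] already guarantees (a Python set cannot hold duplicates); it
-- excludes no Python-representable input.
def Pre_determine_first_failure (rule_map : List (Int × List Int)) (update : List Int) : Prop :=
  ∀ kv ∈ rule_map, kv.2.Nodup
instance (rule_map : List (Int × List Int)) (update : List Int) : Decidable (Pre_determine_first_failure rule_map update) := by unfold Pre_determine_first_failure; infer_instance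

def pvWitness_determine_first_failure : (List (Int × List Int)) × List Int := ([(1, [2])], [2, 1])

def Spec_determine_first_failure (rule_map : List (Int × List Int)) (update : List Int) (out : Option (Int × List Int)) : Prop := out = determine_first_failure_alt rule_map update
instance (rule_map : List (Int × List Int)) (update : List Int) (out : Option (Int × List Int)) : Decidable (Spec_determine_first_failure rule_map update out) := by unfold Spec_determine_first_failure; infer_instance

-- ===== CLAIM (what is proved, stated in full; the proofs are below) =====
def Claim_equal_determine_first_failure : Prop := ∀ (rule_map : List (Int × List Int)) (update : List Int), Dom_determine_first_failure rule_map update → Pre_determine_first_failure rule_map update → Spec_determine_first_failure rule_map update (determine_first_failure rule_map update)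

-- ===== LEMMAS AND PROOFS =====

-- the first-occurrence map: lookup is the leftmost index
theorem pv_posGo_get? (rest : List Int) : ∀ (i : Int) (pos : PySem.Dict Int Int) (p : Int),
    PySem.Dict.get? (pv_posGo i rest pos) p =
      (match PySem.Dict.get? pos p with
       | some v => some v
       | none => if p ∈ rest then some (i + (rest.idxOf p : Int)) else none) := by
  induction rest with
  | nil => intro i pos p; cases h : PySem.Dict.get? pos p <;> simp [pv_posGo, h]
  | cons q rest ih =>
    intro i pos p
    rw [pv_posGo, ih]
    by_cases hpq : p = q
    · subst hpq
      cases h : PySem.Dict.get? pos p with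
      | some v => simp [h]
      | none =>
        simp only [Option.isSome_none, Bool.false_eq_true, if_false]
        rw [PySem.Dict.get?_insert_self]
        simp [List.idxOf_cons_self]
    · have hne : q ≠ p := fun h => hpq h.symm
      have hins : ∀ v, PySem.Dict.get? (PySem.Dict.insert pos q v) p = PySem.Dict.get? pos p :=
        fun v => PySem.Dict.get?_insert_of_ne pos v hpq
      cases h : PySem.Dict.get? pos p with
      | some v =>
        cases hq : PySem.Dict.get? pos q <;> simp [hins, h]
      | none =>
        have hidx : (q :: rest).idxOf p = rest.idxOf p + 1 := List.idxOf_cons_ne rest hne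
        cases hq : PySem.Dict.get? pos q <;>
          · simp only [hq, Option.isSome_some, Option.isSome_none, Bool.false_eq_true,
              if_true, if_false, hins, h]
            rw [hidx]
            simp only [List.mem_cons, hpq, false_or]
            split_ifs with hmem
            · congr 1; push_cast; ring
            · rfl

-- B's per-element test over the whole list equals "occurs somewhere, but not in the prefix"
theorem pv_test_eq (pre rest : List Int) (p : Int) :
    (match PySem.Dict.get? (pv_posGo 0 (pre ++ rest) ⟨[]⟩) p with
     | some j => decide ((pre.length : Int) ≤ j)
     | none => false)
    = (decide (p ∈ pre ++ rest) && !decide (p ∈ pre)) := by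
  rw [pv_posGo_get?]
  have hnil : PySem.Dict.get? (⟨[]⟩ : PySem.Dict Int Int) p = none := by
    simp [PySem.Dict.get?]
  rw [hnil]
  by_cases hmem : p ∈ pre ++ rest
  · simp only [hmem, if_true, decide_true, Bool.true_and]
    by_cases hpre : p ∈ pre
    · have h1 : (pre ++ rest).idxOf p = pre.idxOf p := List.idxOf_append_of_mem hpre
      have h2 : pre.idxOf p < pre.length := List.idxOf_lt_length_of_mem hpre
      simp only [h1, hpre, decide_true, Bool.not_true]
      simp only [zero_add, decide_eq_false_iff_not, not_le]
      exact_mod_cast h2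
    · have h1 : (pre ++ rest).idxOf p = pre.length + rest.idxOf p := List.idxOf_append_of_notMem hpre
      simp only [h1, hpre, decide_false, Bool.not_false]
      simp only [zero_add, decide_eq_true_iff]
      push_cast; omega
  · have hpre : p ∉ pre := fun h => hmem (List.mem_append.mpr (Or.inl h))
    simp [hmem]

-- Set.ofList of a snoc is Set.add
theorem ofList_snoc (l : List Int) (x : Int) :
    PySem.Set.ofList (l ++ [x]) = PySem.Set.add (PySem.Set.ofList l) x := by
  simp [PySem.Set.ofList, List.foldl_append]

-- main loop invariant: both loops agree from any prefix/suffix split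
theorem pv_loop_eq (rule_map : List (Int × List Int)) (update : List Int)
    (hnd : ∀ kv ∈ rule_map, kv.2.Nodup) :
    ∀ (rest pre : List Int), pre ++ rest = update →
      pv_loopA rule_map (PySem.Set.ofList update) (pre.length : Int) rest (PySem.Set.ofList pre)
      = pv_loopB rule_map (pv_posGo 0 update ⟨[]⟩) (pre.length : Int) rest := by
  intro rest
  induction rest with
  | nil => intro pre _; simp [pv_loopA, pv_loopB]
  | cons page rest ih =>
    intro pre hsplit
    have hstep : ((pre ++ [page]).length : Int) = (pre.length : Int) + 1 := by
      push_cast [List.length_append, List.length_cons, List.length_nil]; ring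
    have hsplit' : (pre ++ [page]) ++ rest = update := by
      rw [List.append_assoc]; simpa using hsplit
    have ihnext := ih (pre ++ [page]) hsplit'
    rw [hstep] at ihnext
    rw [pv_loopA, pv_loopB]
    cases hget : PySem.Dict.get? (⟨rule_map⟩ : PySem.Dict Int (List Int)) page with
    | none =>
      simp only []
      rw [← ofList_snoc, ihnext]
    | some preds =>
      -- preds is one of rule_map's values, hence duplicate-free
      have hmempair : ∃ kv ∈ rule_map, kv.2 = preds := by
        simp only [PySem.Dict.get?, Option.map_eq_some_iff] at hget
        obtain ⟨kv, hfind, hv⟩ := hget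
        exact ⟨kv, List.mem_of_find?_eq_some hfind, hv⟩
      obtain ⟨kv, hkv, hv⟩ := hmempair
      have hnodup : preds.Nodup := hv ▸ hnd kv hkv
      -- the two 'missing' lists coincide
      have hmiss :
          PySem.Set.diff (PySem.Set.inter preds (PySem.Set.ofList update)) (PySem.Set.ofList pre)
          = PySem.Set.ofList (preds.filter (fun p =>
              match PySem.Dict.get? (pv_posGo 0 update ⟨[]⟩) p with
              | some j => decide ((pre.length : Int) ≤ j)
              | none => false)) := by
        rw [PySem.Set.ofList_eq_self_of_nodup _ (hnodup.filter _)]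
        simp only [PySem.Set.diff, PySem.Set.inter, List.filter_filter]
        apply List.filter_congr
        intro p _
        rw [← hsplit, pv_test_eq pre (page :: rest)]
        have h1 : PySem.Set.contains (PySem.Set.ofList (pre ++ page :: rest)) p
            = decide (p ∈ pre ++ page :: rest) := by
          simp [PySem.Set.contains, PySem.Set.mem_ofList]
        have h2 : PySem.Set.contains (PySem.Set.ofList pre) p = decide (p ∈ pre) := by
          simp [PySem.Set.contains, PySem.Set.mem_ofList]
        rw [h1, h2, Bool.and_comm]
      simp only [hmiss]
      set m := preds.filter (fun p =>
              match PySem.Dict.get? (pv_posGo 0 update ⟨[]⟩) p with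
              | some j => decide ((pre.length : Int) ≤ j)
              | none => false) with hm
      rw [PySem.Set.ofList_eq_self_of_nodup _ (hnodup.filter _)]
      by_cases hempty : m = []
      · have hlen : ¬ m.length ≠ 0 := by simp [hempty]
        rw [if_neg hlen, if_neg (by simp [hempty] : ¬ m ≠ [])]
        rw [← ofList_snoc, ihnext]
      · have hlen : m.length ≠ 0 := by
          simpa [List.length_eq_zero_iff] using hempty
        rw [if_pos hlen, if_pos hempty]

-- ===== VERDICT (by name: the statement is the Claim_ definition above) =====
theorem determine_first_failure_spec : Claim_equal_determine_first_failure := by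
  intro rule_map update _ hpre
  unfold Spec_determine_first_failure determine_first_failure determine_first_failure_alt
  have h := pv_loop_eq rule_map update hpre update [] rfl
  simpa [PySem.Set.ofList, PySem.Set.empty] using h
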